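-- pv_equiv track=rewrite | github.com/Matteo-Candi/Master-Thesis | benchmark/Python_formatted.py | f
-- ===== SOURCE A (Python) =====
-- def f(n):
--     sum = 0
--     prod = 1
--     result = []
--     for i in range(1, n + 1):
--         sum += i
--         prod *= i
--         if i % 2 == 0:
--             result.append(prod)
--         else:
--             result.append(sum)
--     return result
-- ===== SOURCE B (Python) =====
-- def _fact(i):
--     return 1 if i <= 0 else i * _fact(i - 1)
--
-- def f(n):
--     return [_fact(i) if i % 2 == 0 else i * (i + 1) // 2 for i in range(1, n + 1)]
-- ===== Notes on version B (the rewrite author's own statement) =====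
-- stated objective: idiomatic
-- what changed: The stateful single pass maintaining a running sum and running product is replaced by a comprehension computing each element independently from its index: factorial for even i, closed-form triangular number i*(i+1)//2 for odd i.
import Mathlib
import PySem

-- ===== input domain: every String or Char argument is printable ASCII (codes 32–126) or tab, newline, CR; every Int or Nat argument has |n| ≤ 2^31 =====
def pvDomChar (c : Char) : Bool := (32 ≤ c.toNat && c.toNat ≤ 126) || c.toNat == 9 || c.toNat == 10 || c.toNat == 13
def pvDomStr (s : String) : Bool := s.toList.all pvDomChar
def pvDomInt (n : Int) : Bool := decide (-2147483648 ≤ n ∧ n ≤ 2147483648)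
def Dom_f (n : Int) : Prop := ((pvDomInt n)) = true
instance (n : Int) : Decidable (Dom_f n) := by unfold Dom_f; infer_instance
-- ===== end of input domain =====

-- B replaces A's running-sum/running-product pass by an index-wise comprehension
-- (factorial for even i, closed-form triangular number for odd i): more idiomatic.

-- ===== PORT A =====
def f (n : Int) : List Int :=
  let st := (PySem.List.pyRange 1 (n + 1) 1).foldl
    (fun (st : Int × Int × List Int) i =>
      let s := st.1 + i
      let p := st.2.1 * i
      if PySem.Int.mod i 2 = 0 then (s, p, st.2.2 ++ [p]) else (s, p, st.2.2 ++ [s]))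
    (0, 1, [])
  st.2.2

-- ===== PORT B =====
-- Source B's hand-written recursive _fact, step for step
def pvFact (i : Int) : Int :=
  if i ≤ 0 then 1 else i * pvFact (i - 1)
termination_by i.toNat
decreasing_by omega

def f_alt (n : Int) : List Int :=
  (PySem.List.pyRange 1 (n + 1) 1).map
    (fun i => if PySem.Int.mod i 2 = 0 then pvFact i else PySem.Int.floordiv (i * (i + 1)) 2)

-- ===== PRECONDITION & SPEC =====
def Spec_f (n : Int) (out : List Int) : Prop := out = f_alt n
instance (n : Int) (out : List Int) : Decidable (Spec_f n out) := by unfold Spec_f; infer_instance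

-- ===== CLAIM (what is proved, stated in full; the proofs are below) =====
def Claim_equal_f : Prop := ∀ (n : Int), Dom_f n → Spec_f n (f n)

-- ===== LEMMAS AND PROOFS =====

-- running triangular number, as A maintains it
def pvTri (m : Nat) : Int :=
  match m with
  | 0 => 0
  | m + 1 => pvTri m + (m + 1)

lemma pvTri_double (m : Nat) : 2 * pvTri m = (m : Int) * (m + 1) := by
  induction m with
  | zero => simp [pvTri]
  | succ k ih => simp only [pvTri]; push_cast; push_cast at ih; ring_nf; ring_nf at ih; omega

lemma pvTri_floordiv (m : Nat) :
    PySem.Int.floordiv (((m : Int) + 1) * ((m : Int) + 1 + 1)) 2 = pvTri (m + 1) := by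
  have h : ((m : Int) + 1) * ((m : Int) + 1 + 1) = 2 * pvTri (m + 1) := by
    have := pvTri_double (m + 1); push_cast at this; linarith
  rw [h]
  simp [PySem.Int.floordiv, Int.mul_fdiv_cancel_left]

lemma pvFact_succ (m : Nat) : pvFact ((m : Int) + 1) = ((m : Int) + 1) * pvFact m := by
  rw [pvFact]
  simp

def pvG (i : Int) : Int :=
  if PySem.Int.mod i 2 = 0 then pvFact i else PySem.Int.floordiv (i * (i + 1)) 2

lemma loop_eq (m : Nat) :
    (PySem.List.pyRange 1 ((m : Int) + 1) 1).foldl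
      (fun (st : Int × Int × List Int) i =>
        let s := st.1 + i
        let p := st.2.1 * i
        if PySem.Int.mod i 2 = 0 then (s, p, st.2.2 ++ [p]) else (s, p, st.2.2 ++ [s]))
      (0, 1, [])
    = (pvTri m, pvFact m, (PySem.List.pyRange 1 ((m : Int) + 1) 1).map pvG) := by
  induction m with
  | zero =>
    rw [PySem.List.pyRange_one_eq_nil (by norm_num)]
    simp [pvTri, pvFact]
  | succ k ih =>
    have hsplit : PySem.List.pyRange 1 ((k : Int) + 1 + 1) 1
        = PySem.List.pyRange 1 ((k : Int) + 1) 1 ++ [(k : Int) + 1] := by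
      have := PySem.List.pyRange_one_succ_right (a := 1) (b := (k : Int) + 1) (by omega)
      push_cast at this
      exact this
    push_cast
    rw [hsplit, List.foldl_append, List.map_append, ih]
    simp only [List.foldl_cons, List.foldl_nil, List.map_cons, List.map_nil]
    by_cases h : PySem.Int.mod ((k : Int) + 1) 2 = 0
    · simp only [if_pos h, pvG, Prod.mk.injEq]
      refine ⟨rfl, ?_, ?_⟩
      · rw [pvFact_succ]; ring
      · rw [pvFact_succ]; congr 1; simp; ring
    · simp only [if_neg h, pvG, Prod.mk.injEq]
      refine ⟨rfl, ?_, ?_⟩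
      · rw [pvFact_succ]; ring
      · congr 1
        rw [pvTri_floordiv]
        simp [pvTri]

-- ===== VERDICT (by name: the statement is the Claim_ definition above) =====
theorem f_spec : Claim_equal_f := by
  intro n _
  unfold Spec_f f f_alt
  by_cases hn : n ≤ 0
  · rw [PySem.List.pyRange_one_eq_nil (by omega)]
    simp
  · have hm : n = ((n.toNat : Int)) := by omega
    rw [hm]
    have := loop_eq n.toNat
    rw [this]
    simp [pvG]
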